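-- pv_equiv track=rewrite | github.com/fabricecoulon/AoC2021 | day_06_2021.py | process_data2
-- ===== SOURCE A (Python) =====
-- def process_data2(data):
--     data_next = {}
--     to_add = 0
--     for k in data.keys():
--         if k == 0:
--             # all 0 become 6
--             if 6 in data_next:
--                 data_next[6] += data[k]
--             else:
--                 data_next[6] = data[k]
--             # and append one to 8 for each 6
--             to_add += data[k]
--             continue
--
--         if (k-1) in data_next:
--             data_next[k-1] += data[k]
--         else:
--             data_next[k-1] = data[k]
--
--     if to_add > 0:
--         if 8 in data_next:
--             data_next[8] += to_add
--         else:
--             data_next[8] = to_add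
--
--     return data_next
-- ===== SOURCE B (Python) =====
-- def process_data2(data):
--     spawned = data.get(0, 0)
--     result = {}
--     for b in dict.fromkeys(6 if k == 0 else k - 1 for k in data):
--         result[b] = data.get(b + 1, 0) + (spawned if b == 6 else 0)
--     if spawned > 0:
--         result[8] = result.get(8, 0) + spawned
--     return result
-- ===== Notes on version B (the rewrite author's own statement) =====
-- stated objective: alternative
-- what changed: A threads a mutable accumulator dict with per-key contains/+= merging branches and a to_add counter; B instead computes the deduplicated bucket list up front and fills each bucket by a direct closed-form lookup data.get(b+1,0) plus the spawn count, with one post-loop correction for the 8 bucket. Pre_ only requires distinct keys, which every Python dict argument has by construction.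
import Mathlib
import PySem

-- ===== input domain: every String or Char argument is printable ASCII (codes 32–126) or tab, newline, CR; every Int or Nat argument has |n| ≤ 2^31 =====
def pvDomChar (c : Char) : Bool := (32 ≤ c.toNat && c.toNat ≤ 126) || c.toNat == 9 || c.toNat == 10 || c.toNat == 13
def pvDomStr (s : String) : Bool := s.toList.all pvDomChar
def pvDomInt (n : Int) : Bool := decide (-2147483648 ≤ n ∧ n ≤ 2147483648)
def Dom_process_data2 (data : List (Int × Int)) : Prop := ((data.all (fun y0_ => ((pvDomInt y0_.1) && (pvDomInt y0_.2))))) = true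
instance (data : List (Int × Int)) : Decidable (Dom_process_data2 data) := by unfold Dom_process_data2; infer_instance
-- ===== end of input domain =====

-- B replaces A's accumulate-and-merge loop (per-key contains/+= branches plus a to_add counter)
-- by a deduplicated bucket list filled with direct closed-form lookups and one post-loop fix for bucket 8.


-- ===== PORT A =====
-- the input dict is the association list `data`; `for k in data.keys(): … data[k]` walks its pairs in order
def process_data2 (data : List (Int × Int)) : List (Int × Int) :=
  let step : (PySem.Dict Int Int × Int) → (Int × Int) → (PySem.Dict Int Int × Int) :=
    fun st p =>
      if p.1 = 0 then
        ((if st.1.contains 6 then st.1.modify 6 0 (· + p.2) else st.1.insert 6 p.2), st.2 + p.2)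
      else
        ((if st.1.contains (p.1 - 1) then st.1.modify (p.1 - 1) 0 (· + p.2) else st.1.insert (p.1 - 1) p.2), st.2)
  let r := data.foldl step (PySem.Dict.empty, 0)
  (if r.2 > 0 then (if r.1.contains 8 then r.1.modify 8 0 (· + r.2) else r.1.insert 8 r.2) else r.1).items

-- ===== PORT B =====
def process_data2_alt (data : List (Int × Int)) : List (Int × Int) :=
  let d : PySem.Dict Int Int := PySem.Dict.mk data
  let spawned := d.getD 0 0
  let buckets := PySem.List.dedup (data.map (fun p => if p.1 = 0 then 6 else p.1 - 1))
  let result := buckets.foldl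
    (fun r b => r.insert b (d.getD (b + 1) 0 + (if b = 6 then spawned else 0))) PySem.Dict.empty
  (if spawned > 0 then result.insert 8 (result.getD 8 0 + spawned) else result).items

-- ===== PRECONDITION & SPEC =====
-- Pre_ requires pairwise-distinct keys: a Python dict cannot hold a duplicate key, so an
-- association list with duplicate keys represents no input the Python function can receive.
def Pre_process_data2 (data : List (Int × Int)) : Prop := (data.map Prod.fst).Nodup
instance (data : List (Int × Int)) : Decidable (Pre_process_data2 data) := by unfold Pre_process_data2; infer_instance
def pvWitness_process_data2 : (List (Int × Int)) := [(0, 3), (1, 2), (7, 5)]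
def Spec_process_data2 (data : List (Int × Int)) (out : List (Int × Int)) : Prop := out = process_data2_alt data
instance (data : List (Int × Int)) (out : List (Int × Int)) : Decidable (Spec_process_data2 data out) := by unfold Spec_process_data2; infer_instance

-- ===== CLAIM (what is proved, stated in full; the proofs are below) =====
def Claim_equal_process_data2 : Prop := ∀ (data : List (Int × Int)), Dom_process_data2 data → Pre_process_data2 data → Spec_process_data2 data (process_data2 data)

-- ===== LEMMAS AND PROOFS =====

-- the timer bucket a key k feeds
def pvTgt (k : Int) : Int := if k = 0 then 6 else k - 1

-- total value flowing into bucket b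
def pvSumv (data : List (Int × Int)) (b : Int) : Int :=
  ((data.filter (fun p => pvTgt p.1 == b)).map (·.2)).sum

lemma pv_modify_eq_insert (d : PySem.Dict Int Int) (k d0 : Int) (f : Int → Int) :
    d.modify k d0 f = d.insert k (f (d.getD k d0)) := PySem.Dict.ext_iff.mpr rfl

lemma pv_merge_eq_insert (d : PySem.Dict Int Int) (k v : Int) :
    (if d.contains k then d.modify k 0 (· + v) else d.insert k v)
      = d.insert k (d.getD k 0 + v) := by
  by_cases h : d.contains k
  · simp [h, pv_modify_eq_insert]
  · simp only [Bool.not_eq_true] at h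
    simp [h, PySem.Dict.getD_of_not_contains d 0 h]

lemma pv_fold_pair' (data : List (Int × Int)) (d : PySem.Dict Int Int) (t : Int) :
    data.foldl (fun st p =>
      if p.1 = 0 then (st.1.insert 6 (st.1.getD 6 0 + p.2), st.2 + p.2)
      else (st.1.insert (p.1 - 1) (st.1.getD (p.1 - 1) 0 + p.2), st.2)) (d, t)
    = (data.foldl (fun r p => r.insert (pvTgt p.1) (r.getD (pvTgt p.1) 0 + p.2)) d,
       data.foldl (fun a p => a + (if p.1 = 0 then p.2 else 0)) t) := by
  induction data generalizing d t with
  | nil => rfl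
  | cons p rest ih =>
    simp only [List.foldl_cons]
    by_cases h : p.1 = 0
    · simp only [if_pos h, ih, pvTgt]
      try simp
    · simp only [if_neg h, ih, pvTgt]
      try simp

lemma pv_fold_pair (data : List (Int × Int)) (d : PySem.Dict Int Int) (t : Int) :
    data.foldl (fun st p =>
      if p.1 = 0 then
        ((if st.1.contains 6 then st.1.modify 6 0 (· + p.2) else st.1.insert 6 p.2), st.2 + p.2)
      else
        ((if st.1.contains (p.1 - 1) then st.1.modify (p.1 - 1) 0 (· + p.2) else st.1.insert (p.1 - 1) p.2), st.2)) (d, t)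
    = (data.foldl (fun r p => r.insert (pvTgt p.1) (r.getD (pvTgt p.1) 0 + p.2)) d,
       data.foldl (fun a p => a + (if p.1 = 0 then p.2 else 0)) t) := by
  rw [← pv_fold_pair']
  congr 1
  funext st p
  by_cases h : p.1 = 0
  · simp only [if_pos h, pv_merge_eq_insert]
  · simp only [if_neg h, pv_merge_eq_insert]

-- getD of the accumulation fold is the sum flowing into the bucket
lemma pv_getD_fold (data : List (Int × Int)) (d : PySem.Dict Int Int) (b : Int) :
    (data.foldl (fun r p => r.insert (pvTgt p.1) (r.getD (pvTgt p.1) 0 + p.2)) d).getD b 0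
      = d.getD b 0 + pvSumv data b := by
  induction data generalizing d with
  | nil => simp [pvSumv]
  | cons p rest ih =>
    simp only [List.foldl_cons, ih, pvSumv, List.filter_cons]
    by_cases h : pvTgt p.1 = b
    · simp [h]
      ring
    · have h' : (pvTgt p.1 == b) = false := by simp [h]
      have hb : ¬ b = pvTgt p.1 := fun hh => h hh.symm
      simp [h', PySem.Dict.getD_insert, hb]

-- first-match lookup in a duplicate-free association list is the filtered sum
lemma pv_getD_mk (data : List (Int × Int)) (hnd : (data.map Prod.fst).Nodup) (k : Int) :
    (PySem.Dict.mk data).getD k 0 = ((data.filter (fun p => p.1 == k)).map (·.2)).sum := by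
  induction data with
  | nil => simp [PySem.Dict.getD, PySem.Dict.get?]
  | cons p rest ih =>
    obtain ⟨a, v⟩ := p
    simp only [List.map_cons, List.nodup_cons] at hnd
    by_cases h : a = k
    · have hemp : rest.filter (fun q => q.1 == k) = [] := by
        apply List.filter_eq_nil_iff.mpr
        intro q hq hk
        exact hnd.1 (h ▸ (by simpa using hk) ▸ List.mem_map_of_mem hq)
      simp [PySem.Dict.getD, PySem.Dict.get?_mk_cons, h, hemp]
    · have h' : ((a : Int) == k) = false := by simp [h]
      simp only [PySem.Dict.getD, PySem.Dict.get?_mk_cons, h', List.filter_cons] at *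
      simpa using ih hnd.2

-- the flow into bucket 6 comes from keys 7 and 0
lemma pv_sum_split (l : List (Int × Int)) :
    pvSumv l 6 = ((l.filter (fun p => p.1 == (7:Int))).map (·.2)).sum
      + ((l.filter (fun p => p.1 == (0:Int))).map (·.2)).sum := by
  induction l with
  | nil => simp [pvSumv]
  | cons p rest ih =>
    obtain ⟨a, v⟩ := p
    simp only [pvSumv, List.filter_cons] at *
    by_cases h0 : a = 0
    · have h7 : ((a : Int) == 7) = false := by simp [h0]
      have ht : (pvTgt a == (6:Int)) = true := by simp [pvTgt, h0]
      simp only [ht, h7, show ((a : Int) == 0) = (true : Bool) by simp [h0],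
        if_true, Bool.false_eq_true, if_false, List.map_cons, List.sum_cons, ih]
      try ring
    · by_cases h7 : a = 7
      · have ht : (pvTgt a == (6:Int)) = true := by simp [pvTgt, h7]
        simp only [ht, show ((a : Int) == 7) = (true : Bool) by simp [h7],
          show ((a : Int) == 0) = (false : Bool) by simp [h0],
          if_true, Bool.false_eq_true, if_false, List.map_cons, List.sum_cons, ih]
        try ring
      · have ht : (pvTgt a == (6:Int)) = false := by simp [pvTgt, h0]; omega
        simp only [ht, show ((a : Int) == 7) = (false : Bool) by simp [h7],
          show ((a : Int) == 0) = (false : Bool) by simp [h0],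
          Bool.false_eq_true, if_false, ih]

-- splitting the bucket sum back into the (at most two) source keys
lemma pv_sumv_eq (data : List (Int × Int)) (hnd : (data.map Prod.fst).Nodup) (b : Int) (hb : b ≠ -1) :
    pvSumv data b = (PySem.Dict.mk data).getD (b + 1) 0
      + (if b = 6 then (PySem.Dict.mk data).getD 0 0 else 0) := by
  by_cases h6 : b = 6
  · subst h6
    rw [if_pos rfl, pv_getD_mk data hnd, pv_getD_mk data hnd,
      show (6:Int) + 1 = 7 by norm_num]
    exact pv_sum_split data
  · rw [if_neg h6, add_zero, pv_getD_mk data hnd]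
    have hf : data.filter (fun p => pvTgt p.1 == b) = data.filter (fun p => p.1 == b + 1) := by
      apply List.filter_congr
      intro p _
      simp only [pvTgt]
      by_cases h0 : p.1 = 0
      · rw [if_pos h0, show ((6:Int) == b) = false by rw [beq_eq_false_iff_ne]; omega,
          show (p.1 == b + 1) = false by rw [beq_eq_false_iff_ne]; omega]
      · rw [if_neg h0]
        by_cases he : p.1 - 1 = b
        · rw [show (p.1 - 1 == b) = true by rw [beq_iff_eq]; omega,
            show (p.1 == b + 1) = true by rw [beq_iff_eq]; omega]
        · rw [show (p.1 - 1 == b) = false by rw [beq_eq_false_iff_ne]; omega,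
            show (p.1 == b + 1) = false by rw [beq_eq_false_iff_ne]; omega]
    unfold pvSumv
    rw [hf]

lemma pv_foldl_add_ite (data : List (Int × Int)) (t : Int) :
    data.foldl (fun a p => a + (if p.1 = 0 then p.2 else 0)) t
      = t + ((data.filter (fun p => p.1 == (0:Int))).map (·.2)).sum := by
  induction data generalizing t with
  | nil => simp
  | cons p rest ih =>
    simp only [List.foldl_cons, ih, List.filter_cons]
    by_cases h : p.1 = 0
    · simp [h]; ring
    · simp [h, show (p.1 == (0:Int)) = false by simp [h]]

lemma pv_tgt_ne_neg_one (k : Int) : pvTgt k ≠ -1 := by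
  simp only [pvTgt]; split <;> omega

-- the two accumulated dicts coincide
lemma pv_dicts_eq (data : List (Int × Int)) (hnd : (data.map Prod.fst).Nodup) :
    data.foldl (fun r p => r.insert (pvTgt p.1) (r.getD (pvTgt p.1) 0 + p.2)) PySem.Dict.empty
      = (PySem.List.dedup (data.map (fun p => if p.1 = 0 then 6 else p.1 - 1))).foldl
          (fun r b => r.insert b ((PySem.Dict.mk data).getD (b + 1) 0
            + (if b = 6 then (PySem.Dict.mk data).getD 0 0 else 0))) PySem.Dict.empty := by
  have hmap : data.map (fun p => if p.1 = 0 then 6 else p.1 - 1) = data.map (fun p => pvTgt p.1) := by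
    simp [pvTgt]
  apply PySem.Dict.ext
  rw [PySem.Dict.items_foldl_insert_fresh _ (fun b => b) _ _ (by simp [PySem.Dict.contains_empty])
        (by simpa using PySem.List.nodup_dedup (data.map (fun p => if p.1 = 0 then 6 else p.1 - 1)))]
  have hkeysnd : (data.foldl (fun r p => r.insert (pvTgt p.1) (r.getD (pvTgt p.1) 0 + p.2))
      (PySem.Dict.empty : PySem.Dict Int Int)).keys.Nodup := by
    apply PySem.Dict.nodup_keys_foldl_insert_key data (fun p => pvTgt p.1)
      (fun r p => r.getD (pvTgt p.1) 0 + p.2)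
    simp [PySem.Dict.keys_empty]
  rw [PySem.Dict.items_eq_map_keys _ hkeysnd 0]
  rw [PySem.Dict.keys_foldl_insert_key data (fun p => pvTgt p.1) (fun r p => r.getD (pvTgt p.1) 0 + p.2)]
  have hupd : PySem.Set.update (PySem.Dict.empty : PySem.Dict Int Int).keys (data.map (fun p => pvTgt p.1))
      = PySem.List.dedup (data.map (fun p => pvTgt p.1)) := rfl
  rw [hupd, hmap]
  simp only [show (PySem.Dict.empty : PySem.Dict Int Int).items = [] from rfl, List.nil_append]
  apply List.map_congr_left
  intro b hb
  have hbne : b ≠ -1 := by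
    rcases List.mem_map.mp ((PySem.List.mem_dedup _ _).mp hb) with ⟨p, _, hp⟩
    exact hp ▸ pv_tgt_ne_neg_one p.1
  rw [pv_getD_fold data PySem.Dict.empty b, pv_sumv_eq data hnd b hbne]
  simp [PySem.Dict.getD_empty]

-- ===== VERDICT (by name: the statement is the Claim_ definition above) =====
theorem process_data2_spec : Claim_equal_process_data2 := by
  intro data _ hnd
  unfold Spec_process_data2
  simp only [process_data2, process_data2_alt]
  rw [pv_fold_pair data PySem.Dict.empty 0]
  rw [pv_dicts_eq data hnd]
  rw [pv_foldl_add_ite data 0, zero_add, ← pv_getD_mk data hnd 0]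
  rw [pv_merge_eq_insert]
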